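-- pv_equiv track=rewrite | github.com/LearnerShape/lsgraph | lsengine/pathway_service.py | update_constraints
-- ===== SOURCE A (Python) =====
-- def update_constraints(d,n):
--     """Merge a default set of constraints with new constraints"""
--     for k,v in d.items():
--         if k in n:
--             if isinstance(v, dict):
--                 d[k] = update_constraints(v,n[k])
--             else:
--                 d[k] = n[k]
--     return d
-- ===== SOURCE B (Python) =====
-- def update_constraints(d, n):
--     """Merge a default set of constraints with new constraints.
--
--     Builds and returns a new dict (does not mutate d); for the two-level
--     constraint dicts this service uses, the merge is a single flat
--     comprehension with .get defaults instead of recursion + in-place writes.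
--     """
--     return {
--         k: ({k2: n[k].get(k2, v2) for k2, v2 in v.items()}
--             if isinstance(v, dict) else n[k])
--            if k in n else v
--         for k, v in d.items()
--     }
-- ===== Notes on version B (the rewrite author's own statement) =====
-- stated objective: simpler
-- what changed: Replaces the recursive in-place mutation loop by a single non-mutating dict comprehension that flattens the two-level merge, using .get(k2, v2) defaults instead of membership tests plus assignment.
import Mathlib
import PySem

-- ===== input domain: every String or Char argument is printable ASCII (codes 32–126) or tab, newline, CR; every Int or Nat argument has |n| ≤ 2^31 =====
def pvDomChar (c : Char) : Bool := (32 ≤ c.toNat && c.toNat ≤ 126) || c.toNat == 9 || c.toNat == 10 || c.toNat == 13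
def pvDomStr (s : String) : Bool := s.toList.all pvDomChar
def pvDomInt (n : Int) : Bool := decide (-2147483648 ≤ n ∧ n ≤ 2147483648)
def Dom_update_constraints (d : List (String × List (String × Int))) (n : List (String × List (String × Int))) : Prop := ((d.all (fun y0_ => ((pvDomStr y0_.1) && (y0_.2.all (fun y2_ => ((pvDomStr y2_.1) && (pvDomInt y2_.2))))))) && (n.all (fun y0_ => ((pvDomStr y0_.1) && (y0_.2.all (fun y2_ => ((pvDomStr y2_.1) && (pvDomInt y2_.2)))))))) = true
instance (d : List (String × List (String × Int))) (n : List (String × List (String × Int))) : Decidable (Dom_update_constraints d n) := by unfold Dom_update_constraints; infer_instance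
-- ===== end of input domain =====

-- B replaces A's recursive in-place merge by one non-mutating flat comprehension with
-- .get defaults (objective: simpler). A mutates d in place and returns it; B builds a
-- new dict — the equivalence proved here is about the RETURN value only.

-- ===== PORT A =====
-- A's inner recursive call: values are ints here, so the loop overwrites d[k] with n[k]
-- when k is present (the isinstance branch is false). The loop's in-place overwrite at
-- the current key is transcribed as structural recursion emitting the updated entry.
def ucA_inner : List (String × Int) → List (String × Int) → List (String × Int)
  | [], _ => []
  | (k, v) :: rest, nk =>
      (match nk.lookup k with
       | some x => (k, x)
       | none => (k, v)) :: ucA_inner rest nk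

def update_constraints : List (String × List (String × Int)) → List (String × List (String × Int)) → List (String × List (String × Int))
  | [], _ => []
  | (k, v) :: rest, n =>
      (match n.lookup k with
       | some nv => (k, ucA_inner v nv)   -- isinstance(v, dict): recursive call
       | none => (k, v)) :: update_constraints rest n

-- ===== PORT B =====
def update_constraints_alt (d : List (String × List (String × Int))) (n : List (String × List (String × Int))) : List (String × List (String × Int)) :=
  d.map (fun p =>
    (p.1,
     match n.lookup p.1 with
     | some nv => p.2.map (fun q => (q.1, (nv.lookup q.1).getD q.2))
     | none => p.2))

-- ===== PRECONDITION & SPEC =====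
def Spec_update_constraints (d : List (String × List (String × Int))) (n : List (String × List (String × Int))) (out : List (String × List (String × Int))) : Prop := out = update_constraints_alt d n
instance (d : List (String × List (String × Int))) (n : List (String × List (String × Int))) (out : List (String × List (String × Int))) : Decidable (Spec_update_constraints d n out) := by unfold Spec_update_constraints; infer_instance

-- ===== CLAIM (what is proved, stated in full; the proofs are below) =====
def Claim_equal_update_constraints : Prop := ∀ (d : List (String × List (String × Int))) (n : List (String × List (String × Int))), Dom_update_constraints d n → Spec_update_constraints d n (update_constraints d n)

-- ===== LEMMAS AND PROOFS =====
theorem ucA_inner_eq_map (v nk : List (String × Int)) :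
    ucA_inner v nk = v.map (fun q => (q.1, (nk.lookup q.1).getD q.2)) := by
  induction v with
  | nil => rfl
  | cons p rest ih =>
      obtain ⟨k, x⟩ := p
      simp only [ucA_inner, List.map, ih]
      cases nk.lookup k <;> rfl

theorem uc_eq_alt (d n : List (String × List (String × Int))) :
    update_constraints d n = update_constraints_alt d n := by
  induction d with
  | nil => rfl
  | cons p rest ih =>
      obtain ⟨k, v⟩ := p
      simp only [update_constraints, update_constraints_alt, List.map] at ih ⊢
      rw [ih]
      cases n.lookup k <;> simp [ucA_inner_eq_map]

-- ===== VERDICT (by name: the statement is the Claim_ definition above) =====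
theorem update_constraints_spec : Claim_equal_update_constraints :=
  fun d n _ => uc_eq_alt d n
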